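-- pv_equiv track=rewrite | github.com/Azure/azureml-assets | assets/aml-benchmark/components/src/inference_postprocessor/backup/extractor.py | apply_find_first
-- ===== SOURCE A (Python) =====
-- from typing import List, Callable, Dict
--
-- def apply_find_first(completion: str, candidates: List[str]) -> str:
--     """Finds first occurence of any candidate in completion."""
--     min_index = len(completion)
--     first_candidate = ""
--     for candidate in candidates:
--         index = completion.find(candidate)
--         if index != -1 and index < min_index:
--             min_index = index
--             first_candidate = candidate
--     return first_candidate
-- ===== SOURCE B (Python) =====
-- def apply_find_first(completion: str, candidates: list) -> str:
--     """Finds first occurence of any candidate in completion.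
--
--     Scans positions of completion left to right; at each position returns
--     the first candidate (in list order) that starts there.
--     """
--     suffix = completion
--     while suffix:
--         for candidate in candidates:
--             if suffix.startswith(candidate):
--                 return candidate
--         suffix = suffix[1:]
--     return ""
-- ===== Notes on version B (the rewrite author's own statement) =====
-- stated objective: faster
-- what changed: B scans positions of the completion left to right and returns the first candidate (in list order) that starts at the current position, exiting at the first match, instead of A's candidate-by-candidate full str.find scans with min-index tracking.
import Mathlib
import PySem

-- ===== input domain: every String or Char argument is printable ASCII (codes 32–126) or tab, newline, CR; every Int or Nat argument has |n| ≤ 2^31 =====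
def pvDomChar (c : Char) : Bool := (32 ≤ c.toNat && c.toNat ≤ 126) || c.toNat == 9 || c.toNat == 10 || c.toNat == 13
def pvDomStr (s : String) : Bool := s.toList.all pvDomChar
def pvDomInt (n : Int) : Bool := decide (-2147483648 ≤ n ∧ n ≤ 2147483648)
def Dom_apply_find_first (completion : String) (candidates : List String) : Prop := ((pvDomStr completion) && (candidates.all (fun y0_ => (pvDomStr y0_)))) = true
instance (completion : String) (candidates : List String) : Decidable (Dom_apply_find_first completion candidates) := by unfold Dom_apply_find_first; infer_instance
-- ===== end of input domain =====

-- B scans positions left to right with early exit instead of A's per-candidate find with min tracking.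

-- ===== PORT A =====
-- the loop: state (min_index, first_candidate), update when find ≠ -1 and strictly smaller
def pvStepA (t : List Char) (st : Int × String) (cand : String) : Int × String :=
  let index := PySem.Chars.find t cand.toList
  if index ≠ -1 ∧ index < st.1 then (index, cand) else st

def apply_find_first (completion : String) (candidates : List String) : String :=
  (candidates.foldl (pvStepA completion.toList) ((completion.toList.length : Int), "")).2

-- ===== PORT B =====
-- first candidate (in list order) that is a prefix of the suffix
def pvFirstAt (suffix : List Char) : List String → Option String
  | [] => none
  | c :: cs => if PySem.Chars.startswith suffix c.toList then some c else pvFirstAt suffix cs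

-- while suffix: try candidates at this position, else drop one char
def pvScanB (cands : List String) : List Char → String
  | [] => ""
  | a :: rest =>
    match pvFirstAt (a :: rest) cands with
    | some c => c
    | none => pvScanB cands rest

def apply_find_first_alt (completion : String) (candidates : List String) : String :=
  pvScanB candidates completion.toList

-- ===== PRECONDITION & SPEC =====
def Spec_apply_find_first (completion : String) (candidates : List String) (out : String) : Prop := out = apply_find_first_alt completion candidates
instance (completion : String) (candidates : List String) (out : String) : Decidable (Spec_apply_find_first completion candidates out) := by unfold Spec_apply_find_first; infer_instance

-- ===== CLAIM (what is proved, stated in full; the proofs are below) =====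
def Claim_equal_apply_find_first : Prop := ∀ (completion : String) (candidates : List String), Dom_apply_find_first completion candidates → Spec_apply_find_first completion candidates (apply_find_first completion candidates)

-- ===== LEMMAS AND PROOFS =====

-- proof-only: B's scan with the absolute position of the match
def pvScanPos (cands : List String) : List Char → Option (Nat × String)
  | [] => none
  | a :: rest =>
    match pvFirstAt (a :: rest) cands with
    | some c => some (0, c)
    | none => (pvScanPos cands rest).map (fun p => (p.1 + 1, p.2))

lemma pvScanB_eq_scanPos (cands : List String) (t : List Char) :
    pvScanB cands t = (pvScanPos cands t).elim "" (·.2) := by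
  induction t with
  | nil => rfl
  | cons a rest ih =>
    simp only [pvScanB, pvScanPos]
    cases h : pvFirstAt (a :: rest) cands with
    | some c => rfl
    | none =>
      simp only [ih]
      cases pvScanPos cands rest <;> rfl

lemma pvFirstAt_append (t : List Char) (cs : List String) (c : String) :
    pvFirstAt t (cs ++ [c]) =
      ((pvFirstAt t cs).orElse (fun _ => if PySem.Chars.startswith t c.toList then some c else none)) := by
  induction cs with
  | nil => simp [pvFirstAt]
  | cons d ds ih =>
    simp only [List.cons_append, pvFirstAt]
    split <;> simp [ih]

lemma infix_iff_exists_drop (c t : List Char) :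
    c <:+: t ↔ ∃ j, c <+: t.drop j := by
  constructor
  · intro h
    rw [← PySem.Chars.isIn_iff_infix] at h
    exact (PySem.Chars.exists_prefix_drop_iff_isIn c t).mpr h
  · intro h
    rw [← PySem.Chars.isIn_iff_infix]
    exact (PySem.Chars.exists_prefix_drop_iff_isIn c t).mp h

lemma find_eq_zero_of_prefix {c t : List Char} (h : c <+: t) :
    PySem.Chars.find t c = 0 := by
  have hnn : 0 ≤ PySem.Chars.find t c := by
    rw [PySem.Chars.find_nonneg_iff]
    exact (infix_iff_exists_drop c t).mpr ⟨0, by simpa using h⟩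
  have hspec := PySem.Chars.find_spec (s := t) (sub := c) hnn
  by_contra hne
  have hpos : 0 < (PySem.Chars.find t c).toNat := by omega
  exact (hspec.2 0 hpos) (by simpa using h)

-- find on a cons, when the pattern is not a prefix: shift find on the tail by one
lemma find_cons_of_not_prefix {a : Char} {rest : List Char} {c : List Char}
    (h : ¬ c <+: (a :: rest)) :
    PySem.Chars.find (a :: rest) c =
      if PySem.Chars.find rest c = -1 then -1 else PySem.Chars.find rest c + 1 := by
  by_cases hr : PySem.Chars.find rest c = -1
  · rw [if_pos hr]
    rw [PySem.Chars.find_eq_neg_one_iff] at hr ⊢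
    intro hin
    rcases (infix_iff_exists_drop c (a :: rest)).mp hin with ⟨j, hj⟩
    cases j with
    | zero => exact h (by simpa using hj)
    | succ j' =>
      exact hr ((infix_iff_exists_drop c rest).mpr ⟨j', by simpa using hj⟩)
  · rw [if_neg hr]
    have hrnn : 0 ≤ PySem.Chars.find rest c := by
      have := PySem.Chars.neg_one_le_find (s := rest) (sub := c); omega
    have hrs := PySem.Chars.find_spec (s := rest) (sub := c) hrnn
    have hnn : 0 ≤ PySem.Chars.find (a :: rest) c := by
      rw [PySem.Chars.find_nonneg_iff]
      exact (infix_iff_exists_drop c (a :: rest)).mpr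
        ⟨(PySem.Chars.find rest c).toNat + 1, by simpa using hrs.1⟩
    have hts := PySem.Chars.find_spec (s := a :: rest) (sub := c) hnn
    have hF0 : (PySem.Chars.find (a :: rest) c).toNat ≠ 0 := by
      intro h0
      apply h
      have := hts.1
      rw [h0] at this
      simpa using this
    obtain ⟨i, hi⟩ : ∃ i, (PySem.Chars.find (a :: rest) c).toNat = i + 1 :=
      ⟨(PySem.Chars.find (a :: rest) c).toNat - 1, by omega⟩
    have hci : c <+: rest.drop i := by
      have := hts.1; rw [hi] at this; simpa using this
    have h1 : (PySem.Chars.find rest c).toNat ≤ i := by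
      by_contra hlt
      exact (hrs.2 i (by omega)) hci
    have h2 : ¬ (PySem.Chars.find rest c).toNat + 1 < (PySem.Chars.find (a :: rest) c).toNat := by
      intro hlt
      exact (hts.2 _ hlt) (by simpa using hrs.1)
    have e1 := Int.toNat_of_nonneg hnn
    have e2 := Int.toNat_of_nonneg hrnn
    omega

-- appending one candidate: B's scan updates exactly by A's strict-min rule
lemma pvScanPos_append (t : List Char) (cs : List String) (c : String) :
    pvScanPos (cs ++ [c]) t =
      match pvScanPos cs t with
      | none =>
          if 0 ≤ PySem.Chars.find t c.toList ∧ PySem.Chars.find t c.toList < (t.length : Int)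
          then some ((PySem.Chars.find t c.toList).toNat, c) else none
      | some (i, b) =>
          if 0 ≤ PySem.Chars.find t c.toList ∧ PySem.Chars.find t c.toList < (i : Int)
          then some ((PySem.Chars.find t c.toList).toNat, c) else some (i, b) := by
  induction t with
  | nil =>
    simp only [pvScanPos]
    by_cases hc : c.toList = []
    · simp [hc, PySem.Chars.find_nil]
    · have : PySem.Chars.find ([] : List Char) c.toList = -1 := by
        rw [PySem.Chars.find_eq_neg_one_iff]
        intro hin
        exact hc (List.eq_nil_of_infix_nil hin)
      simp [this]
  | cons a rest ih =>
    cases hin : pvFirstAt (a :: rest) cs with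
    | some b =>
      have hfa : pvFirstAt (a :: rest) (cs ++ [c]) = some b := by
        rw [pvFirstAt_append, hin]; rfl
      simp only [pvScanPos, hfa, hin]
      split_ifs with h
      · exfalso; push_cast at h; omega
      · rfl
    | none =>
      by_cases hsw : PySem.Chars.startswith (a :: rest) c.toList = true
      · -- c matches at this position: find = 0, and it beats any later match
        have hfa : pvFirstAt (a :: rest) (cs ++ [c]) = some c := by
          rw [pvFirstAt_append, hin]; simp [Option.orElse, hsw]
        have hpre : c.toList <+: (a :: rest) := (PySem.Chars.startswith_iff _ _).mp hsw
        have hf0 : PySem.Chars.find (a :: rest) c.toList = 0 := find_eq_zero_of_prefix hpre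
        simp only [pvScanPos, hfa, hin, hf0]
        cases pvScanPos cs rest with
        | none =>
          simp only [Option.map_none]
          rw [if_pos ⟨le_refl 0, by simp only [List.length_cons]; push_cast; omega⟩]
          rfl
        | some p =>
          simp only [Option.map_some]
          rw [if_pos ⟨le_refl 0, by push_cast; omega⟩]
          rfl
      · have hfa : pvFirstAt (a :: rest) (cs ++ [c]) = none := by
          rw [pvFirstAt_append, hin]; simp [Option.orElse, hsw]
        have hnpre : ¬ c.toList <+: (a :: rest) := fun hp =>
          hsw ((PySem.Chars.startswith_iff _ _).mpr hp)
        have hf := find_cons_of_not_prefix (a := a) (rest := rest) hnpre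
        have hr1 := PySem.Chars.neg_one_le_find (s := rest) (sub := c.toList)
        simp only [pvScanPos, hfa, hin, ih]
        cases hsp : pvScanPos cs rest with
        | none =>
          simp only [Option.map_none]
          by_cases hrneg : PySem.Chars.find rest c.toList = -1
          · simp [hf, hrneg]
          · have hrnn : 0 ≤ PySem.Chars.find rest c.toList := by omega
            rw [hf, if_neg hrneg]
            by_cases hlt : PySem.Chars.find rest c.toList < (rest.length : Int)
            · rw [if_pos ⟨hrnn, hlt⟩,
                if_pos ⟨by omega, by simp only [List.length_cons]; push_cast; omega⟩,
                Option.map_some]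
              simp only [Option.some.injEq, Prod.mk.injEq]
              exact ⟨by omega, trivial⟩
            · rw [if_neg (fun hc => hlt hc.2),
                if_neg (by simp only [List.length_cons]; push_cast; omega), Option.map_none]
        | some p =>
          obtain ⟨i, b⟩ := p
          simp only [Option.map_some]
          by_cases hrneg : PySem.Chars.find rest c.toList = -1
          · simp [hf, hrneg]
          · have hrnn : 0 ≤ PySem.Chars.find rest c.toList := by omega
            rw [hf, if_neg hrneg]
            by_cases hlt : PySem.Chars.find rest c.toList < (i : Int)
            · rw [if_pos ⟨hrnn, hlt⟩, if_pos ⟨by omega, by push_cast; omega⟩, Option.map_some]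
              simp only [Option.some.injEq, Prod.mk.injEq]
              exact ⟨by omega, trivial⟩
            · rw [if_neg (fun hc => hlt hc.2), if_neg (by push_cast; omega)]
              rfl

lemma pvScanPos_nil (t : List Char) : pvScanPos [] t = none := by
  induction t with
  | nil => rfl
  | cons a rest ih => simp [pvScanPos, pvFirstAt, ih]

lemma foldA_eq_scanPos (t : List Char) (cs : List String) :
    cs.foldl (pvStepA t) ((t.length : Int), "") =
      match pvScanPos cs t with
      | none => ((t.length : Int), "")
      | some (i, b) => ((i : Int), b) := by
  induction cs using List.reverseRecOn with
  | nil => simp [pvScanPos_nil]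
  | append_singleton cs c ih =>
    rw [List.foldl_append, List.foldl_cons, List.foldl_nil, ih, pvScanPos_append]
    have hneg := PySem.Chars.neg_one_le_find (s := t) (sub := c.toList)
    cases hsp : pvScanPos cs t with
    | none =>
      simp only [pvStepA]
      by_cases h : 0 ≤ PySem.Chars.find t c.toList ∧ PySem.Chars.find t c.toList < (t.length : Int)
      · rw [if_pos h, if_pos (by constructor <;> omega)]
        simp only
        congr 1
        omega
      · rw [if_neg h, if_neg (by intro ⟨h1, h2⟩; exact h ⟨by omega, h2⟩)]
    | some p =>
      obtain ⟨i, b⟩ := p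
      simp only [pvStepA]
      by_cases h : 0 ≤ PySem.Chars.find t c.toList ∧ PySem.Chars.find t c.toList < (i : Int)
      · rw [if_pos h, if_pos (by constructor <;> omega)]
        simp only
        congr 1
        omega
      · rw [if_neg h, if_neg (by intro ⟨h1, h2⟩; exact h ⟨by omega, h2⟩)]

-- ===== VERDICT (by name: the statement is the Claim_ definition above) =====
theorem apply_find_first_spec : Claim_equal_apply_find_first := by
  intro completion candidates _
  unfold Spec_apply_find_first apply_find_first apply_find_first_alt
  rw [foldA_eq_scanPos, pvScanB_eq_scanPos]
  cases pvScanPos candidates completion.toList with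
  | none => rfl
  | some p => rfl
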